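-- pv_equiv track=rewrite | github.com/Tejas07PSK/lb_dsa_cracker | String/Function to find Number of customers who could not get a computer/solution.py | runCustomerSimulation
-- ===== SOURCE A (Python) =====
-- def runCustomerSimulation (nc, cas):
--     map = {}
--     result, num_of_cus_left = 0, 0
--     i = 0
--     while (i < len(cas)):
--         if (cas[i] not in map):
--             map[cas[i]] = 0
--         if (map[cas[i]] == 0):
--             map[cas[i]] += 1
--             if (nc > 0):
--                 nc -= 1
--             else:
--                 num_of_cus_left += 1
--                 result += 1
--         else:
--             map[cas[i]] -= 1
--             if (num_of_cus_left > 0):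
--                 num_of_cus_left -= 1
--             else:
--                 nc += 1
--         i += 1
--     return result
-- ===== SOURCE B (Python) =====
-- def runCustomerSimulation(nc, cas):
--     # Stateless recomputation: no presence set and no capacity counters carried along.
--     # Position i is an arrival iff cas[i] occurs an even number of times in cas[:i];
--     # the occupancy just before i is the number of distinct customers with an odd
--     # occurrence count in cas[:i], recomputed from scratch.  An arrival is denied
--     # (counted) iff that occupancy is >= nc.
--     result = 0
--     prefix = []
--     for c in cas:
--         if prefix.count(c) % 2 == 0:
--             counts = {}
--             for x in prefix:
--                 counts[x] = counts.get(x, 0) + 1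
--             if sum(v % 2 for v in counts.values()) >= nc:
--                 result += 1
--         prefix.append(c)
--     return result
-- ===== Notes on version B (the rewrite author's own statement) =====
-- stated objective: alternative
-- what changed: Replaces A's incremental simulation (a 0/1 dict plus nc/num_of_cus_left counters updated per event) with a stateless per-position characterisation: an index is an arrival iff its value occurred an even number of times in the preceding prefix, and it is counted iff the number of distinct values with odd occurrence count in that prefix (the occupancy, recomputed from scratch from a fresh count dict) is >= nc; trades O(n) for O(n^2) in exchange for carrying no simulation state.
import Mathlib
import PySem

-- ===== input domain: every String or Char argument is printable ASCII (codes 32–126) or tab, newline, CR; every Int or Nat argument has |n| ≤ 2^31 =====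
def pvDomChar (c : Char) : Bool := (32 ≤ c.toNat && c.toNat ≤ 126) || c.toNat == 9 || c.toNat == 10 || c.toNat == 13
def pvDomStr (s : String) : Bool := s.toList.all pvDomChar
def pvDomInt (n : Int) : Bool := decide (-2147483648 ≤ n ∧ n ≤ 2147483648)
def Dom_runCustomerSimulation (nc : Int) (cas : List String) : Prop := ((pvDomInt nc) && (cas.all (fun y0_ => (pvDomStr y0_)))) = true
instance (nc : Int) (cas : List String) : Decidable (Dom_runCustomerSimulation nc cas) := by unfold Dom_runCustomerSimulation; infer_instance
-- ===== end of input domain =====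

-- B replaces A's incremental allocation simulation by a stateless recomputation per
-- position (arrival iff even prior count; counted iff the prefix holds ≥ nc distinct
-- odd-count customers); objective: alternative (not faster — O(n²) vs A's O(n)).

-- ===== PORT A =====
-- state: (map, result, num_of_cus_left, nc)
def pvStepA (st : PySem.Dict String Int × Int × Int × Int) (c : String) :
    PySem.Dict String Int × Int × Int × Int :=
  let m := if st.1.contains c then st.1 else st.1.insert c 0   -- if cas[i] not in map: map[cas[i]] = 0
  if m.getD c 0 = 0 then                                       -- if map[cas[i]] == 0:
    let m' := m.modify c 0 (· + 1)                             --   map[cas[i]] += 1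
    if st.2.2.2 > 0 then (m', st.2.1, st.2.2.1, st.2.2.2 - 1)  --   if nc > 0: nc -= 1
    else (m', st.2.1 + 1, st.2.2.1 + 1, st.2.2.2)              --   else: num_of_cus_left += 1; result += 1
  else
    let m' := m.modify c 0 (· - 1)                             --   map[cas[i]] -= 1
    if st.2.2.1 > 0 then (m', st.2.1, st.2.2.1 - 1, st.2.2.2)  --   if num_of_cus_left > 0: num_of_cus_left -= 1
    else (m', st.2.1, st.2.2.1, st.2.2.2 + 1)                  --   else: nc += 1

def runCustomerSimulation (nc : Int) (cas : List String) : Int :=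
  (cas.foldl pvStepA (PySem.Dict.empty, 0, 0, nc)).2.1

-- ===== PORT B =====
-- counts = {}; for x in prefix: counts[x] = counts.get(x, 0) + 1
def pvCounts (p : List String) : PySem.Dict String Int :=
  p.foldl (fun d x => d.insert x (d.getD x 0 + 1)) PySem.Dict.empty

-- occupancy of a prefix: sum(v % 2 for v in counts.values())
def pvOccB (p : List String) : Int :=
  ((pvCounts p).values.map (fun v => PySem.Int.mod v 2)).sum

-- loop body: state = (prefix, result)
def pvStepB (nc : Int) (st : List String × Int) (c : String) : List String × Int :=
  (st.1 ++ [c],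
   if PySem.Int.mod ((PySem.List.count st.1 c : Int)) 2 = 0 then
     (if pvOccB st.1 ≥ nc then st.2 + 1 else st.2)
   else st.2)

def runCustomerSimulation_alt (nc : Int) (cas : List String) : Int :=
  (cas.foldl (pvStepB nc) ([], 0)).2

-- ===== PRECONDITION & SPEC =====
def Spec_runCustomerSimulation (nc : Int) (cas : List String) (out : Int) : Prop := out = runCustomerSimulation_alt nc cas
instance (nc : Int) (cas : List String) (out : Int) : Decidable (Spec_runCustomerSimulation nc cas out) := by unfold Spec_runCustomerSimulation; infer_instance

-- ===== CLAIM (what is proved, stated in full; the proofs are below) =====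
def Claim_equal_runCustomerSimulation : Prop := ∀ (nc : Int) (cas : List String), Dom_runCustomerSimulation nc cas → Spec_runCustomerSimulation nc cas (runCustomerSimulation nc cas)

-- ===== LEMMAS AND PROOFS =====

-- proof-internal middle form: the "occupancy set" fold both programs are compared to
def pvStepG (nc : Int) (st : PySem.Set String × Int) (c : String) : PySem.Set String × Int :=
  if PySem.Set.contains st.1 c then (PySem.Set.discard st.1 c, st.2)
  else (PySem.Set.add st.1 c, if PySem.Set.len st.1 ≥ nc then st.2 + 1 else st.2)

-- A's loop state vs the middle form: the dict holds 1 exactly on the present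
-- customers, and left/nc are determined by the occupancy |active| and the original N
theorem pv_loopA (N : Int) (cs : List String) :
    ∀ (m : PySem.Dict String Int) (res left ncA : Int) (active : PySem.Set String),
      active.Nodup →
      (∀ c, m.getD c 0 = if c ∈ active then 1 else 0) →
      left = (active.length : Int) - min (active.length : Int) (max N 0) →
      ncA = N - min (active.length : Int) (max N 0) →
      (cs.foldl pvStepA (m, res, left, ncA)).2.1 = (cs.foldl (pvStepG N) (active, res)).2 := by
  induction cs with
  | nil => intro m res left ncA active _ _ _ _; rfl
  | cons c cs ih =>
    intro m res left ncA active hnd hval hleft hnc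
    -- the setdefault step never changes any getD _ 0 value
    have hval' : ∀ c', (if m.contains c then m else m.insert c 0).getD c' 0 = m.getD c' 0 := by
      intro c'
      by_cases hc : m.contains c = true
      · rw [if_pos hc]
      · rw [if_neg hc, PySem.Dict.getD_insert]
        split_ifs with h
        · subst h
          rw [PySem.Dict.getD_of_not_contains (h := by simpa using hc)]
        · rfl
    by_cases hmem : c ∈ active
    · -- departure
      have hocc1 : 1 ≤ active.length := List.length_pos_of_mem hmem
      have hdlen : ((PySem.Set.discard active c).length : Int) = (active.length : Int) - 1 := by
        have : PySem.Set.discard active c = active.erase c := by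
          rw [PySem.Set.discard, List.Nodup.erase_eq_filter hnd]
          simp [bne]
        rw [this, List.length_erase_of_mem hmem]
        omega
      have hget : (if m.contains c then m else m.insert c 0).getD c 0 = 1 := by
        rw [hval' c, hval c]; simp [hmem]
      simp only [List.foldl_cons, pvStepA, pvStepG, hget,
        show PySem.Set.contains active c = true by simpa [PySem.Set.contains] using hmem]
      simp only [if_true]
      have hvalD : ∀ c', ((if m.contains c then m else m.insert c 0).modify c 0 (· - 1)).getD c' 0
          = if c' ∈ PySem.Set.discard active c then 1 else 0 := by
        intro c'
        rw [PySem.Dict.getD_modify, hval' c, hval' c', hval c, hval c']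
        simp only [PySem.Set.mem_discard]
        by_cases h1 : c' = c
        · subst h1; simp [hmem]
        · simp [h1]
      by_cases hl : left > 0
      · rw [if_pos hl]
        exact ih _ _ _ _ _ (PySem.Set.nodup_discard _ _ hnd) hvalD (by omega) (by omega)
      · rw [if_neg hl]
        exact ih _ _ _ _ _ (PySem.Set.nodup_discard _ _ hnd) hvalD (by omega) (by omega)
    · -- arrival
      have hget : (if m.contains c then m else m.insert c 0).getD c 0 = 0 := by
        rw [hval' c, hval c]; simp [hmem]
      have halen : ((PySem.Set.add active c).length : Int) = (active.length : Int) + 1 := by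
        rw [PySem.Set.add_of_not_mem hmem]; simp
      simp only [List.foldl_cons, pvStepA, pvStepG, hget,
        show PySem.Set.contains active c = false by simpa [PySem.Set.contains] using hmem]
      simp only [if_true, Bool.false_eq_true, if_false]
      have hvalA : ∀ c', ((if m.contains c then m else m.insert c 0).modify c 0 (· + 1)).getD c' 0
          = if c' ∈ PySem.Set.add active c then 1 else 0 := by
        intro c'
        rw [PySem.Dict.getD_modify, hval' c, hval' c', hval c, hval c']
        simp only [PySem.Set.mem_add]
        by_cases h1 : c' = c
        · subst h1; simp [hmem]
        · simp [h1]
      have hnodupA : (PySem.Set.add active c).Nodup := PySem.Set.nodup_add _ _ hnd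
      have hlen : PySem.Set.len active = (active.length : Int) := rfl
      by_cases hcap : ncA > 0
      · have hB : ¬ PySem.Set.len active ≥ N := by rw [hlen]; omega
        rw [if_pos hcap, if_neg hB]
        exact ih _ _ _ _ _ hnodupA hvalA (by omega) (by omega)
      · have hB : PySem.Set.len active ≥ N := by rw [hlen]; omega
        rw [if_neg hcap, if_pos hB]
        exact ih _ _ _ _ _ hnodupA hvalA (by omega) (by omega)

-- B's parity test in Nat form
theorem pv_mod2 (p : List String) (x : String) :
    PySem.Int.mod ((PySem.List.count p x : Int)) 2 = ((List.count x p % 2 : Nat) : Int) := by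
  rw [PySem.List.count_eq]
  exact_mod_cast PySem.Int.mod_natCast (List.count x p) 2

-- B's recomputed occupancy equals the size of the matching present-customer set
theorem pv_occ_eq (p : List String) (active : PySem.Set String)
    (hnd : active.Nodup) (hmem : ∀ c, c ∈ active ↔ List.count c p % 2 = 1) :
    pvOccB p = PySem.Set.len active := by
  have h1 : pvOccB p
      = ((PySem.Set.ofList p).map (fun x => if (List.count x p % 2 == 1) = true then 1 else 0)).sum := by
    unfold pvOccB pvCounts
    rw [PySem.Dict.foldl_insert_getD_add_one_eq_counter]
    simp only [PySem.Dict.values, PySem.Dict.items_counter, List.map_map]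
    congr 1
    refine List.map_congr_left (fun x _ => ?_)
    simp only [Function.comp]
    rw [show PySem.Int.mod ((List.count x p : Int)) 2 = ((List.count x p % 2 : Nat) : Int) by
      exact_mod_cast PySem.Int.mod_natCast (List.count x p) 2]
    have : List.count x p % 2 = 0 ∨ List.count x p % 2 = 1 := Nat.mod_two_eq_zero_or_one _
    rcases this with h | h <;> simp [h]
  rw [h1, PySem.List.sum_map_ite_one_zero]
  have hperm : (List.filter (fun x => List.count x p % 2 == 1) (PySem.Set.ofList p)).Perm active := by
    rw [List.perm_ext_iff_of_nodup (List.Nodup.filter _ (PySem.Set.nodup_ofList p)) hnd]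
    intro a
    simp only [List.mem_filter, PySem.Set.mem_ofList, beq_iff_eq, hmem a]
    constructor
    · exact fun h => h.2
    · intro h
      refine ⟨?_, h⟩
      have : 0 < List.count a p := by omega
      exact List.count_pos_iff.mp this
  have : List.countP (fun x => List.count x p % 2 == 1) (PySem.Set.ofList p) = active.length := by
    rw [List.countP_eq_length_filter, hperm.length_eq]
  rw [this]; rfl

-- the middle form against B's fold: active holds exactly the odd-count customers of the prefix
theorem pv_loopB (N : Int) (cs : List String) :
    ∀ (pre : List String) (res : Int) (active : PySem.Set String),
      active.Nodup →
      (∀ c, c ∈ active ↔ List.count c pre % 2 = 1) →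
      (cs.foldl (pvStepG N) (active, res)).2 = (cs.foldl (pvStepB N) (pre, res)).2 := by
  induction cs with
  | nil => intro pre res active _ _; rfl
  | cons c cs ih =>
    intro pre res active hnd hmem
    have hcnt : ∀ x, List.count x (pre ++ [c]) = List.count x pre + (if x = c then 1 else 0) := by
      intro x
      by_cases h : x = c <;> simp [List.count_append, List.count_eq_zero, h]
    by_cases hodd : List.count c pre % 2 = 1
    · -- departure: c present
      have hc : c ∈ active := (hmem c).mpr hodd
      simp only [List.foldl_cons, pvStepG, pvStepB,
        show PySem.Set.contains active c = true by simpa [PySem.Set.contains] using hc,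
        if_true, pv_mod2]
      rw [if_neg (show ¬ ((List.count c pre % 2 : Nat) : Int) = 0 by push_cast; omega)]
      refine ih _ _ _ (PySem.Set.nodup_discard _ _ hnd) (fun c' => ?_)
      rw [PySem.Set.mem_discard, hmem c', hcnt c']
      by_cases h1 : c' = c
      · subst h1; simp; omega
      · simp [h1]
    · -- arrival: c absent
      have hc : c ∉ active := fun h => hodd ((hmem c).mp h)
      have heven : List.count c pre % 2 = 0 := by omega
      simp only [List.foldl_cons, pvStepG, pvStepB,
        show PySem.Set.contains active c = false by simpa [PySem.Set.contains] using hc,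
        Bool.false_eq_true, if_false, pv_mod2, pv_occ_eq pre active hnd hmem]
      have hinv : ∀ c', c' ∈ PySem.Set.add active c ↔ List.count c' (pre ++ [c]) % 2 = 1 := by
        intro c'
        rw [PySem.Set.mem_add, hmem c', hcnt c']
        by_cases h1 : c' = c
        · subst h1; simp; omega
        · simp [h1]
      rw [if_pos (show ((List.count c pre % 2 : Nat) : Int) = 0 by push_cast; omega)]
      by_cases hN : PySem.Set.len active ≥ N
      · rw [if_pos hN]
        exact ih _ _ _ (PySem.Set.nodup_add _ _ hnd) hinv
      · rw [if_neg hN]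
        exact ih _ _ _ (PySem.Set.nodup_add _ _ hnd) hinv

-- ===== VERDICT (by name: the statement is the Claim_ definition above) =====
theorem runCustomerSimulation_spec : Claim_equal_runCustomerSimulation := by
  intro nc cas _
  unfold Spec_runCustomerSimulation runCustomerSimulation runCustomerSimulation_alt
  rw [pv_loopA nc cas PySem.Dict.empty 0 0 nc PySem.Set.empty List.nodup_nil
      (fun c => by simp [PySem.Dict.getD_empty, PySem.Set.empty]) (by simp) (by simp)]
  exact pv_loopB nc cas [] 0 PySem.Set.empty List.nodup_nil
    (fun c => by simp [PySem.Set.empty])
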